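-- pv_equiv track=rewrite | github.com/kmorgan31/adventofcode | 2015/day11.py | get_password
-- ===== SOURCE A (Python) =====
-- ALPHABET = "abcdefghijklmnopqrstuvwxyz"
--
-- def increment_password(word):
--     word = list(word)
--
--     i = len(word)-1
--     while i >= 0:
--         j = ALPHABET[(ALPHABET.index(word[i])+1) % len(ALPHABET)]
--         word[i] = j
--         if j != "a":
--             break
--         i -= 1
--
--     return "".join(word[-8:])
--
-- def get_password(word):
--
--     while True:
--         if set(["i", "o", "l"]) & set(word):
--             word = increment_password(word)
--             continue
--
--         i = 0
--         found = False
--         while i < len(ALPHABET)-2: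
--             if ALPHABET[i:i+3] in word:
--                 found = True
--                 break
--             i += 1
--         if not found:
--             word = increment_password(word)
--             continue
--
--         i = 0
--         pairs = []
--         while i < len(word)-1:
--             if word[i] == word[i+1]:
--                 pairs.append(word[i])
--                 i += 2
--             else:
--                 i += 1
--         if len(set(pairs)) < 2:
--             word = increment_password(word)
--             continue
--
--         return word
-- ===== SOURCE B (Python) =====
-- def _valid(word):
--     # one left-to-right pass: i/o/l flag, straight-of-three flag,
--     # and two-distinct-non-overlapping-pairs flag (greedy, like a scanner)
--     has_iol = False
--     has_straight = False
--     first_pair = None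
--     two_pairs = False
--     prev_paired = False
--     n = len(word)
--     i = 0
--     while i < n:
--         c = word[i]
--         if c in "iol":
--             has_iol = True
--         if i + 2 < n and 'a' <= c <= 'x' and word[i+1] == chr(ord(c) + 1) and word[i+2] == chr(ord(c) + 2):
--             has_straight = True
--         if (not prev_paired) and i + 1 < n and word[i+1] == c:
--             if first_pair is None:
--                 first_pair = c
--             elif c != first_pair:
--                 two_pairs = True
--             prev_paired = True
--         else:
--             prev_paired = False
--         i += 1
--     return (not has_iol) and has_straight and two_pairs
--
-- def _next(word):
--     # find the trailing run of 'z', bump the letter before it, pad with 'a'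
--     k = len(word) - 1
--     while k >= 0 and word[k] == 'z':
--         k -= 1
--     if k < 0:
--         w2 = 'a' * len(word)
--     else:
--         w2 = word[:k] + chr(ord(word[k]) + 1) + 'a' * (len(word) - 1 - k)
--     return w2[-8:]
--
-- def get_password(word):
--     while not _valid(word):
--         word = _next(word)
--     return word
-- ===== Notes on version B (the rewrite author's own statement) =====
-- stated objective: alternative
-- what changed: B fuses A's three separate validity passes (set intersection, 24 substring searches, index-jumping pair collection) into one left-to-right scan with a small state machine, and replaces A's in-place right-to-left carry loop by locating the trailing 'z'-run once and rebuilding the string by slice + bumped letter + 'a'-padding.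
-- outside the precondition, e.g. on get_password('qq#abcdd'): A returns 'qq#abcdd', B returns 'qq#abcdd'
import Mathlib
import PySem

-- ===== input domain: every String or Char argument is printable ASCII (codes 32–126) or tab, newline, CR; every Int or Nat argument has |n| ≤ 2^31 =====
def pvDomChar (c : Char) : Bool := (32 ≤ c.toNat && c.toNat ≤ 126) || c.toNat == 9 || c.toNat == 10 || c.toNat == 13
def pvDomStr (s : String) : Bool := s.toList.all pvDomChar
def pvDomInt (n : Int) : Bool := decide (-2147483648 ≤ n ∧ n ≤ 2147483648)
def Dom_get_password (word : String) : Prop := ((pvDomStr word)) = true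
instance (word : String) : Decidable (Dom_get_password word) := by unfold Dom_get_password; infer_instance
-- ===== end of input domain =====

-- B replaces A's three separate validity scans (set intersection, 24 substring searches,
-- index-jumping pair collection) by ONE left-to-right scan, and replaces A's in-place
-- right-to-left increment loop by "find the trailing 'z'-run, bump, pad with 'a'"
-- built by slicing; objective: alternative (same asymptotic cost per candidate).

-- ===== PORT A =====

def pvAlpha : List Char := "abcdefghijklmnopqrstuvwxyz".toList

-- while i >= 0: j = ALPHABET[(ALPHABET.index(word[i])+1) % 26]; word[i] = j; if j != 'a': break; i -= 1
-- (argument k is Python's i+1, so k = 0 means the loop has ended; ALPHABET.index ported via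
-- Chars.find — the ValueError case, find = -1, is outside Pre_)
def pvIncLoopA (w : List Char) : Nat → List Char
  | 0 => w
  | k + 1 =>
    let c := w.getD k ' '
    let j := (PySem.List.pyGet? pvAlpha (PySem.Int.mod (PySem.Chars.find pvAlpha [c] + 1) 26)).getD ' '
    let w' := w.set k j
    if j ≠ 'a' then w' else pvIncLoopA w' k

-- increment_password: the loop above, then "".join(word[-8:])
def pvIncA (w : List Char) : List Char :=
  PySem.List.slice (pvIncLoopA w w.length) (some (-8)) none

-- while i < len(ALPHABET)-2: if ALPHABET[i:i+3] in word: found = True; break; i += 1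
def pvStraightLoopA (w : List Char) (i : Nat) : Bool :=
  if i < 24 then
    (if PySem.Chars.isIn (PySem.List.slice pvAlpha (some (i : Int)) (some ((i : Int) + 3))) w then true
     else pvStraightLoopA w (i + 1))
  else false
  termination_by 24 - i

-- while i < len(word)-1: if word[i] == word[i+1]: pairs.append(word[i]); i += 2 else: i += 1
def pvPairsLoopA : List Char → List Char
  | [] => []
  | [_] => []
  | a :: b :: rest => if a = b then a :: pvPairsLoopA rest else pvPairsLoopA (b :: rest)

-- the 'while True' of get_password; fuel only makes the recursion total (Pre_ inputs terminate)
def pvLoopA : Nat → List Char → List Char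
  | 0, w => w
  | f + 1, w =>
    if ¬ (PySem.Set.inter (PySem.Set.ofList ['i', 'o', 'l']) (PySem.Set.ofList w) = []) then
      pvLoopA f (pvIncA w)
    else if ¬ (pvStraightLoopA w 0 = true) then
      pvLoopA f (pvIncA w)
    else if PySem.Set.len (PySem.Set.ofList (pvPairsLoopA w)) < 2 then
      pvLoopA f (pvIncA w)
    else w

def pvFuelA : Nat := 208827064578   -- 26^8 + 2, enough for every terminating run

def get_password (word : String) : String := String.ofList (pvLoopA pvFuelA word.toList)

-- ===== PORT B =====

-- the single scan of Source B's _valid: state (has_iol, has_straight, first_pair, two_pairs,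
-- prev_paired), one step per character, peeking at the next two; returns (iol, straight, two)
-- word[i+1] == chr(ord(c)+1) and word[i+2] == chr(ord(c)+2) with the bound checks, on the suffix
def pvWin : Char → List Char → Bool
  | c, a :: b :: _ =>
    decide ('a' ≤ c) && decide (c ≤ 'x') &&
      decide (a = Char.ofNat (c.toNat + 1)) && decide (b = Char.ofNat (c.toNat + 2))
  | _, _ => false

-- i + 1 < n and word[i+1] == c, on the suffix
def pvNextIs : Char → List Char → Bool
  | c, a :: _ => decide (a = c)
  | _, [] => false

def pvScanB : List Char → Bool → Bool → Option Char → Bool → Bool → Bool × Bool × Bool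
  | [], iol, st, _, two, _ => (iol, st, two)
  | c :: rest, iol, st, fp, two, pp =>
    let iol' := iol || decide (c ∈ ['i', 'o', 'l'])   -- c in "iol" (one-char membership)
    let st' := st || pvWin c rest
    if !pp && pvNextIs c rest then
      match fp with
      | none => pvScanB rest iol' st' (some c) two true
      | some d => pvScanB rest iol' st' (some d) (two || decide (c ≠ d)) true
    else pvScanB rest iol' st' fp two false

def pvValidB (w : List Char) : Bool :=
  match pvScanB w false false none false false with
  | (iol, st, two) => !iol && st && two

-- k = len(word)-1; while k >= 0 and word[k] == 'z': k -= 1   (argument is Python's k+1)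
def pvLastNonZ (w : List Char) : Nat → Int
  | 0 => -1
  | k + 1 => if w.getD k ' ' = 'z' then pvLastNonZ w k else (k : Int)

-- _next: bump the letter before the trailing 'z'-run, pad with 'a', keep the last 8
def pvIncB (w : List Char) : List Char :=
  let k := pvLastNonZ w w.length
  let w2 :=
    if k < 0 then List.replicate w.length 'a'
    else PySem.List.slice w none (some k) ++
         [Char.ofNat ((w.getD k.toNat ' ').toNat + 1)] ++
         List.replicate (w.length - 1 - k.toNat) 'a'
  PySem.List.slice w2 (some (-8)) none

-- while not _valid(word): word = _next(word)  (fuel only makes the recursion total)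
def pvLoopB : Nat → List Char → List Char
  | 0, w => w
  | f + 1, w => if pvValidB w then w else pvLoopB f (pvIncB w)

def pvFuelB : Nat := 208827064578   -- 26^8 + 2, same bound as port A's fuel

def get_password_alt (word : String) : String := String.ofList (pvLoopB pvFuelB word.toList)

-- ===== PRECONDITION & SPEC =====
-- a lowercase letter, as a boolean (used only by Pre_)
def pvLowChar (c : Char) : Bool := decide ('a' ≤ c) && decide (c ≤ 'z')

-- Pre_ excludes lowercase words shorter than 5 (no valid password that short exists, so A
-- never returns), words whose last min(8,len) characters are not all lowercase letters and
-- words ending in 8 'z' but not fully lowercase (on those A's increment eventually calls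
-- ALPHABET.index on a character outside a-z and raises ValueError, or never returns) — except
-- that A returns some already-valid words with stray characters outside the scanned suffix
-- unchanged (see cites; B returns them unchanged too).
def Pre_get_password (word : String) : Prop :=
  5 ≤ word.toList.length ∧
  ((word.toList.drop (word.toList.length - 8)).all pvLowChar = true) ∧
  (word.toList.drop (word.toList.length - 8) ≠ List.replicate 8 'z' ∨
    word.toList.all pvLowChar = true)

instance (word : String) : Decidable (Pre_get_password word) := by
  unfold Pre_get_password; infer_instance

def pvWitness_get_password : String := "aabcq"

def Spec_get_password (word : String) (out : String) : Prop := out = get_password_alt word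
instance (word : String) (out : String) : Decidable (Spec_get_password word out) := by unfold Spec_get_password; infer_instance

-- ===== CLAIM (what is proved, stated in full; the proofs are below) =====
def Claim_equal_get_password : Prop := ∀ (word : String), Dom_get_password word → Pre_get_password word → Spec_get_password word (get_password word)

-- ===== LEMMAS AND PROOFS =====

-- ---- small Char facts ----
theorem pvChLe (c d : Char) : (c ≤ d) ↔ c.toNat ≤ d.toNat := by
  rw [Char.le_def, UInt32.le_iff_toNat_le]; rfl

theorem pvChToNatOf (n : Nat) (h : n < 55296) : (Char.ofNat n).toNat = n := by
  rw [Char.toNat_ofNat, if_pos]; exact Or.inl (by omega)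

theorem pvChEq (c d : Char) (h : c.toNat = d.toNat) : c = d := by
  have := congrArg Char.ofNat h
  rwa [Char.ofNat_toNat, Char.ofNat_toNat] at this

-- lowercase words (the content of Pre_)
def pvLower (w : List Char) : Prop := ∀ c ∈ w, 'a' ≤ c ∧ c ≤ 'z'

-- ---- the i/o/l check ----
theorem pvScan_iol (w : List Char) : ∀ i s fp t p,
    (pvScanB w i s fp t p).1 = (i || w.any fun c => decide (c ∈ ['i', 'o', 'l'])) := by
  induction w with
  | nil => intro i s fp t p; simp [pvScanB]
  | cons c rest ih =>
    intro i s fp t p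
    cases fp <;>
      (simp only [pvScanB, List.any_cons]
       split <;> (try split) <;> rw [ih] <;> simp [Bool.or_assoc])

theorem pvIolA_iff (w : List Char) :
    (PySem.Set.inter (PySem.Set.ofList ['i', 'o', 'l']) (PySem.Set.ofList w) = []) ↔
      (w.any fun c => decide (c ∈ ['i', 'o', 'l'])) = false := by
  rw [List.eq_nil_iff_forall_not_mem]
  constructor
  · intro h
    simp only [List.any_eq_false]
    intro c hc hmem
    exact h c ((PySem.Set.mem_inter _ _ c).2
      ⟨(PySem.Set.mem_ofList _ c).2 (by simpa using hmem), (PySem.Set.mem_ofList _ c).2 hc⟩)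
  · intro h x hx
    rcases (PySem.Set.mem_inter _ _ x).1 hx with ⟨h1, h2⟩
    rw [PySem.Set.mem_ofList] at h1 h2
    simp only [List.any_eq_false] at h
    exact absurd (by simpa using h1) (by simpa using h x h2)

-- ---- the straight-of-three check ----

def pvTrip : List Char → Bool
  | [] => false
  | c :: rest => pvWin c rest || pvTrip rest

def pvTriple (j : Nat) : List Char :=
  [Char.ofNat (97 + j), Char.ofNat (98 + j), Char.ofNat (99 + j)]

theorem pvScan_straight (w : List Char) : ∀ i s fp t p,
    (pvScanB w i s fp t p).2.1 = (s || pvTrip w) := by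
  induction w with
  | nil => intro i s fp t p; simp [pvScanB, pvTrip]
  | cons c rest ih =>
    intro i s fp t p
    cases fp <;>
      (simp only [pvScanB, pvTrip]
       split <;> (try split) <;> rw [ih] <;> simp [Bool.or_assoc])

theorem pvWin_iff (c : Char) (rest : List Char) :
    pvWin c rest = true ↔ ∃ j < 24, pvTriple j <+: (c :: rest) := by
  constructor
  · intro h
    match rest with
    | a :: b :: t =>
      simp only [pvWin, Bool.and_eq_true, decide_eq_true_eq] at h
      obtain ⟨⟨⟨h1, h2⟩, ha⟩, hb⟩ := h
      rw [pvChLe] at h1 h2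
      have h1' : 97 ≤ c.toNat := by simpa using h1
      have h2' : c.toNat ≤ 120 := by simpa using h2
      refine ⟨c.toNat - 97, by omega, ?_⟩
      have e1 : 97 + (c.toNat - 97) = c.toNat := by omega
      have e2 : 98 + (c.toNat - 97) = c.toNat + 1 := by omega
      have e3 : 99 + (c.toNat - 97) = c.toNat + 2 := by omega
      simp only [pvTriple, e1, e2, e3, Char.ofNat_toNat, ← ha, ← hb]
      simp [List.cons_prefix_cons]
    | [] => simp [pvWin] at h
    | [a] => simp [pvWin] at h
  · rintro ⟨j, hj, t, ht⟩
    have hn : (Char.ofNat (97 + j)).toNat = 97 + j := pvChToNatOf _ (by omega)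
    match rest with
    | [] => simp [pvTriple] at ht
    | [a] => simp [pvTriple] at ht
    | a :: b :: t2 =>
      simp only [pvTriple, List.cons_append, List.nil_append] at ht
      injection ht with e1 rest1
      injection rest1 with e2 rest2
      injection rest2 with e3 _
      subst e1; subst e2; subst e3
      simp only [pvWin, Bool.and_eq_true, decide_eq_true_eq]
      refine ⟨⟨⟨?_, ?_⟩, ?_⟩, ?_⟩
      · rw [pvChLe, hn, show 'a'.toNat = 97 from rfl]; omega
      · rw [pvChLe, hn, show 'x'.toNat = 120 from rfl]; omega
      · rw [hn]; congr 1; omega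
      · rw [hn]; congr 1; omega

theorem pvTrip_iff (w : List Char) :
    pvTrip w = true ↔ ∃ j < 24, pvTriple j <:+: w := by
  induction w with
  | nil =>
    simp only [pvTrip, Bool.false_eq_true, false_iff]
    rintro ⟨j, hj, h⟩
    have := h.length_le
    simp [pvTriple] at this
  | cons c rest ih =>
    simp only [pvTrip, Bool.or_eq_true, pvWin_iff, ih]
    constructor
    · rintro (⟨j, hj, h⟩ | ⟨j, hj, h⟩)
      · exact ⟨j, hj, h.isInfix⟩
      · exact ⟨j, hj, h.trans (List.infix_cons_iff.2 (Or.inr (List.infix_refl _)))⟩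
    · rintro ⟨j, hj, h⟩
      rcases List.infix_cons_iff.1 h with h' | h'
      · exact Or.inl ⟨j, hj, h'⟩
      · exact Or.inr ⟨j, hj, h'⟩

theorem pvSliceAlpha : ∀ j ∈ List.range 24,
    PySem.List.slice pvAlpha (some (j : Int)) (some ((j : Int) + 3)) = pvTriple j := by decide

theorem pvStraightA_iff (w : List Char) : ∀ n i, 24 - i = n →
    (pvStraightLoopA w i = true ↔
      ∃ j, i ≤ j ∧ j < 24 ∧ PySem.Chars.isIn (PySem.List.slice pvAlpha (some (j : Int)) (some ((j : Int) + 3))) w = true) := by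
  intro n
  induction n with
  | zero =>
    intro i hi
    rw [pvStraightLoopA, if_neg (by omega)]
    simp only [Bool.false_eq_true, false_iff]
    rintro ⟨j, h1, h2, _⟩
    omega
  | succ n ihn =>
    intro i hi
    rw [pvStraightLoopA, if_pos (by omega)]
    by_cases h : PySem.Chars.isIn (PySem.List.slice pvAlpha (some (i : Int)) (some ((i : Int) + 3))) w = true
    · simp only [h, if_true, true_iff]
      exact ⟨i, le_refl i, by omega, h⟩
    · rw [if_neg h, ihn (i + 1) (by omega)]
      constructor
      · rintro ⟨j, h1, h2, h3⟩; exact ⟨j, by omega, h2, h3⟩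
      · rintro ⟨j, h1, h2, h3⟩
        refine ⟨j, ?_, h2, h3⟩
        rcases Nat.eq_or_lt_of_le h1 with rfl | h'
        · exact absurd h3 h
        · omega

theorem pvStraightA_eq_trip (w : List Char) : pvStraightLoopA w 0 = pvTrip w := by
  rw [Bool.eq_iff_iff, pvStraightA_iff w 24 0 rfl, pvTrip_iff]
  constructor
  · rintro ⟨j, _, hj, h⟩
    refine ⟨j, hj, ?_⟩
    rw [pvSliceAlpha j (List.mem_range.2 hj)] at h
    exact (PySem.Chars.isIn_iff_infix _ _).1 h
  · rintro ⟨j, hj, h⟩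
    exact ⟨j, Nat.zero_le _, hj, by
      rw [pvSliceAlpha j (List.mem_range.2 hj)]
      exact (PySem.Chars.isIn_iff_infix _ _).2 h⟩

-- ---- the two-pairs check ----

-- state machine B runs on the successive pair letters (first_pair, two_pairs)
def pvG : Option Char → Bool → List Char → Bool
  | _, two, [] => two
  | none, two, c :: ps => pvG (some c) two ps
  | some d, two, c :: ps => pvG (some d) (two || decide (c ≠ d)) ps

theorem pvScanB_cons (c : Char) (rest : List Char) (iol st : Bool) (fp : Option Char)
    (two pp : Bool) :
    pvScanB (c :: rest) iol st fp two pp =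
      (if !pp && pvNextIs c rest then
        match fp with
        | none => pvScanB rest (iol || decide (c ∈ ['i', 'o', 'l'])) (st || pvWin c rest) (some c) two true
        | some d => pvScanB rest (iol || decide (c ∈ ['i', 'o', 'l'])) (st || pvWin c rest) (some d) (two || decide (c ≠ d)) true
      else pvScanB rest (iol || decide (c ∈ ['i', 'o', 'l'])) (st || pvWin c rest) fp two false) := rfl

theorem pvScan_pairs (w : List Char) : ∀ i s fp two,
    (pvScanB w i s fp two false).2.2 = pvG fp two (pvPairsLoopA w) := by
  induction w using pvPairsLoopA.induct with
  | case1 => intro i s fp two; cases fp <;> simp [pvScanB, pvPairsLoopA, pvG]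
  | case2 x => intro i s fp two; cases fp <;> simp [pvScanB, pvPairsLoopA, pvNextIs, pvG]
  | case3 b rest ih =>
    intro i s fp two
    rw [pvScanB_cons, if_pos (by simp [pvNextIs])]
    cases fp with
    | none =>
      show (pvScanB (b :: rest) _ _ (some b) two true).2.2 = _
      rw [pvScanB_cons, if_neg (by simp), ih]
      rw [pvPairsLoopA]
      simp only [if_pos rfl]
      rfl
    | some d =>
      show (pvScanB (b :: rest) _ _ (some d) (two || decide (b ≠ d)) true).2.2 = _
      rw [pvScanB_cons, if_neg (by simp), ih]
      rw [pvPairsLoopA]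
      simp only [if_pos rfl]
      rfl
  | case4 a b rest hne ih =>
    intro i s fp two
    have hd : decide (b = a) = false := by simp; exact fun h => hne h.symm
    rw [pvScanB_cons, if_neg (by simp [pvNextIs, hd]), ih]
    rw [pvPairsLoopA, if_neg hne]

theorem pvG_some (ps : List Char) : ∀ d two,
    pvG (some d) two ps = (two || ps.any fun x => decide (x ≠ d)) := by
  induction ps with
  | nil => intro d two; simp [pvG]
  | cons c t ih => intro d two; show pvG (some d) (two || decide (c ≠ d)) t = _; rw [ih]; simp [Bool.or_assoc]

theorem pvG_none (ps : List Char) :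
    pvG none false ps = (match ps with
      | [] => false
      | c :: t => t.any fun x => decide (x ≠ c)) := by
  cases ps with
  | nil => rfl
  | cons c t => rw [pvG, pvG_some]; simp

theorem pvNodup_two_le (s : List Char) (h : s.Nodup) :
    2 ≤ s.length ↔ ∃ a ∈ s, ∃ b ∈ s, a ≠ b := by
  constructor
  · intro hl
    match s, hl with
    | a :: b :: t, _ =>
      refine ⟨a, by simp, b, by simp, ?_⟩
      intro hab
      subst hab
      simp [List.nodup_cons] at h
  · rintro ⟨a, ha, b, hb, hab⟩
    match s with
    | [] => simp at ha
    | [x] =>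
      simp at ha hb
      subst ha; subst hb; exact absurd rfl hab
    | x :: y :: t => simp [Nat.le_add_left]

theorem pvPairs_iff (ps : List Char) :
    pvG none false ps = decide (2 ≤ PySem.Set.len (PySem.Set.ofList ps)) := by
  rw [pvG_none, Bool.eq_iff_iff, decide_eq_true_eq]
  have hset : (2 ≤ PySem.Set.len (PySem.Set.ofList ps)) ↔ ∃ a ∈ ps, ∃ b ∈ ps, a ≠ b := by
    unfold PySem.Set.len
    rw [show ((2 : Int) ≤ ((PySem.Set.ofList ps).length : Int)) ↔ 2 ≤ (PySem.Set.ofList ps).length by exact_mod_cast Iff.rfl]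
    rw [pvNodup_two_le _ (PySem.Set.nodup_ofList ps)]
    simp [PySem.Set.mem_ofList]
  rw [hset]
  cases ps with
  | nil => simp
  | cons c t =>
    simp only [List.any_eq_true, decide_eq_true_eq]
    constructor
    · rintro ⟨x, hx, hxc⟩
      exact ⟨c, by simp, x, by simp [hx], fun h => hxc h.symm⟩
    · rintro ⟨a, ha, b, hb, hab⟩
      simp only [List.mem_cons] at ha hb
      rcases ha with rfl | ha <;> rcases hb with rfl | hb
      · exact absurd rfl hab
      · exact ⟨b, hb, fun h => hab h.symm⟩
      · exact ⟨a, ha, hab⟩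
      · by_cases hac : a = c
        · subst hac; exact ⟨b, hb, fun h => hab h.symm⟩
        · exact ⟨a, ha, hac⟩

-- ---- validity: B's single scan computes A's three checks ----

theorem pvValidB_eq (w : List Char) :
    pvValidB w = (!(w.any fun c => decide (c ∈ ['i', 'o', 'l'])) &&
      pvStraightLoopA w 0 && decide (2 ≤ PySem.Set.len (PySem.Set.ofList (pvPairsLoopA w)))) := by
  unfold pvValidB
  rw [show (pvScanB w false false none false false) =
      ((pvScanB w false false none false false).1,
       (pvScanB w false false none false false).2.1,
       (pvScanB w false false none false false).2.2) from rfl]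
  rw [pvScan_iol, pvScan_straight, pvScan_pairs, pvPairs_iff, pvStraightA_eq_trip]
  simp only [Bool.false_or]

-- ---- the increment: A's right-to-left carry loop = B's trailing-'z'-run splice ----

theorem pvIncLoopA_append (v s : List Char) : ∀ k, k ≤ v.length →
    pvIncLoopA (v ++ s) k = pvIncLoopA v k ++ s := by
  intro k
  induction k generalizing v with
  | zero => intro _; rfl
  | succ k ih =>
    intro hk
    have hlt : k < v.length := by omega
    simp only [pvIncLoopA]
    rw [List.getD_append _ _ _ _ hlt, List.set_append_left _ _ hlt]
    split
    · rfl
    · exact ih (v.set k _) (by simp; omega)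

theorem pvCharSuccAux : ∀ k ∈ List.range 25,
    (PySem.List.pyGet? pvAlpha
      (PySem.Int.mod (PySem.Chars.find pvAlpha [Char.ofNat (97 + k)] + 1) 26)).getD ' ' =
      Char.ofNat (97 + k + 1) := by decide

theorem pvCharSucc (c : Char) (h1 : 97 ≤ c.toNat) (h2 : c.toNat ≤ 121) :
    (PySem.List.pyGet? pvAlpha
      (PySem.Int.mod (PySem.Chars.find pvAlpha [c] + 1) 26)).getD ' ' =
      Char.ofNat (c.toNat + 1) := by
  have hk : 97 + (c.toNat - 97) = c.toNat := by omega
  have hc : c = Char.ofNat (97 + (c.toNat - 97)) := by rw [hk, Char.ofNat_toNat]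
  have := pvCharSuccAux (c.toNat - 97) (List.mem_range.2 (by omega))
  rw [← hc] at this
  rw [this, hk]

theorem pvCharZ :
    (PySem.List.pyGet? pvAlpha
      (PySem.Int.mod (PySem.Chars.find pvAlpha ['z'] + 1) 26)).getD ' ' = 'a' := by decide

theorem pvSuccNeA (c : Char) (h1 : 97 ≤ c.toNat) (h2 : c.toNat ≤ 121) :
    Char.ofNat (c.toNat + 1) ≠ 'a' := by
  intro h
  have := congrArg Char.toNat h
  rw [pvChToNatOf _ (by omega)] at this
  rw [show 'a'.toNat = 97 from rfl] at this
  omega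

theorem pvIncA_gen : ∀ (m : Nat) (u : List Char) (c : Char), 97 ≤ c.toNat → c.toNat ≤ 121 →
    pvIncLoopA (u ++ c :: List.replicate m 'z') (u.length + 1 + m) =
      u ++ Char.ofNat (c.toNat + 1) :: List.replicate m 'a' := by
  intro m
  induction m with
  | zero =>
    intro u c h1 h2
    simp only [List.replicate_zero]
    show pvIncLoopA (u ++ [c]) (u.length + 1) = u ++ [Char.ofNat (c.toNat + 1)]
    simp only [pvIncLoopA]
    rw [show (u ++ [c]).getD u.length ' ' = c by simp]
    rw [pvCharSucc c h1 h2]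
    rw [if_pos (pvSuccNeA c h1 h2)]
    rw [List.set_append (i := u.length), if_neg (by simp)]
    simp
  | succ m ih =>
    intro u c h1 h2
    have e : u ++ c :: List.replicate (m+1) 'z' = (u ++ c :: List.replicate m 'z') ++ ['z'] := by
      rw [List.replicate_succ' ]; simp
    rw [e]
    have hl : (u ++ c :: List.replicate m 'z').length = u.length + 1 + m := by simp; omega
    rw [show u.length + 1 + (m + 1) = (u.length + 1 + m) + 1 by omega]
    simp only [pvIncLoopA]
    rw [show ((u ++ c :: List.replicate m 'z') ++ ['z']).getD (u.length + 1 + m) ' ' = 'z' by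
      rw [← hl]; simp]
    rw [pvCharZ, if_neg (by simp)]
    rw [List.set_append (i := u.length + 1 + m), if_neg (by omega)]
    rw [hl, Nat.sub_self, List.set_cons_zero]
    rw [pvIncLoopA_append _ _ _ (by omega)]
    rw [ih u c h1 h2]
    rw [List.replicate_succ' ]
    simp

theorem pvIncA_allz : ∀ n, pvIncLoopA (List.replicate n 'z') n = List.replicate n 'a' := by
  intro n
  induction n with
  | zero => rfl
  | succ n ih =>
    simp only [pvIncLoopA]
    rw [List.getD_replicate _ (by omega), pvCharZ]
    rw [if_neg (by simp)]
    rw [show List.replicate (n+1) 'z' = List.replicate n 'z' ++ ['z'] from List.replicate_succ' ..]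
    rw [List.set_append (i := n)]
    rw [if_neg (by simp)]
    simp only [List.length_replicate, Nat.sub_self, List.set_cons_zero]
    rw [pvIncLoopA_append _ _ n (by simp), ih]
    rw [← List.replicate_succ' ]

theorem pvLnz_allz : ∀ n k, k ≤ n → pvLastNonZ (List.replicate n 'z') k = -1 := by
  intro n k
  induction k with
  | zero => intro _; rfl
  | succ k ih =>
    intro hk
    rw [pvLastNonZ, if_pos (List.getD_replicate _ (by omega)), ih (by omega)]

theorem pvLnz_zrun (w : List Char) (k : Nat) : ∀ j, (∀ t, k ≤ t → t < k + j → w.getD t ' ' = 'z') →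
    pvLastNonZ w (k + j) = pvLastNonZ w k := by
  intro j
  induction j with
  | zero => intro _; rfl
  | succ j ih =>
    intro h
    rw [show k + (j + 1) = (k + j) + 1 from rfl, pvLastNonZ,
      if_pos (h (k + j) (by omega) (by omega)), ih (fun t h1 h2 => h t h1 (by omega))]

theorem pvLnz_gen (u : List Char) (c : Char) (m : Nat) (hc : c ≠ 'z') :
    pvLastNonZ (u ++ c :: List.replicate m 'z') (u.length + 1 + m) = (u.length : Int) := by
  rw [show u.length + 1 + m = (u.length + 1) + m by omega]
  rw [pvLnz_zrun _ _ m ?_]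
  · rw [pvLastNonZ]
    rw [show (u ++ c :: List.replicate m 'z').getD u.length ' ' = c by
      rw [List.getD_append_right _ _ _ _ (le_refl _)]; simp]
    rw [if_neg hc]
  · intro t h1 h2
    rw [show u ++ c :: List.replicate m 'z' = (u ++ [c]) ++ List.replicate m 'z' by simp]
    rw [List.getD_append_right _ _ _ _ (by simp; omega)]
    rw [List.getD_replicate _ (by simp; omega)]

theorem pvIncB_gen (u : List Char) (c : Char) (m : Nat) (h1 : 97 ≤ c.toNat) (h2 : c.toNat ≤ 121) :
    pvIncB (u ++ c :: List.replicate m 'z') =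
      PySem.List.slice (u ++ Char.ofNat (c.toNat + 1) :: List.replicate m 'a') (some (-8)) none := by
  have hc : c ≠ 'z' := by
    intro h; rw [h] at h2; exact absurd h2 (by decide)
  unfold pvIncB
  rw [show (u ++ c :: List.replicate m 'z').length = u.length + 1 + m by simp; omega]
  rw [pvLnz_gen u c m hc]
  dsimp only
  rw [if_neg (by omega)]
  rw [Int.toNat_natCast]
  rw [PySem.List.slice_to _ (by omega)]
  rw [Int.toNat_natCast]
  rw [List.take_left' rfl]
  rw [show (u ++ c :: List.replicate m 'z').getD u.length ' ' = c by
    rw [List.getD_append_right _ _ _ _ (le_refl _)]; simp]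
  rw [show u.length + 1 + m - 1 - u.length = m by omega]
  simp

theorem pvIncB_allz (n : Nat) :
    pvIncB (List.replicate n 'z') = PySem.List.slice (List.replicate n 'a') (some (-8)) none := by
  unfold pvIncB
  rw [List.length_replicate, pvLnz_allz n n le_rfl]
  dsimp only
  rw [if_pos (by norm_num)]

theorem pvDecomp (w : List Char) :
    (∃ n, w = List.replicate n 'z') ∨
      ∃ u c m, w = u ++ c :: List.replicate m 'z' ∧ c ≠ 'z' := by
  induction w using List.reverseRecOn with
  | nil => exact Or.inl ⟨0, rfl⟩
  | append_singleton ys d ih =>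
    by_cases hd : d = 'z'
    · subst hd
      rcases ih with ⟨n, rfl⟩ | ⟨u, c, m, rfl, hc⟩
      · exact Or.inl ⟨n + 1, by rw [List.replicate_succ' ]⟩
      · refine Or.inr ⟨u, c, m + 1, ?_, hc⟩
        rw [List.replicate_succ' ]
        simp
    · exact Or.inr ⟨ys, d, 0, by simp, hd⟩

theorem pvChBounds (c : Char) (hlow : 'a' ≤ c ∧ c ≤ 'z') (hc : c ≠ 'z') :
    97 ≤ c.toNat ∧ c.toNat ≤ 121 := by
  have h1 : 97 ≤ c.toNat := by
    have := (pvChLe 'a' c).1 hlow.1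
    simpa [show 'a'.toNat = 97 from rfl] using this
  have h3 : c.toNat ≤ 122 := by
    have := (pvChLe c 'z').1 hlow.2
    simpa [show 'z'.toNat = 122 from rfl] using this
  refine ⟨h1, ?_⟩
  rcases Nat.eq_or_lt_of_le h3 with he | _
  · exact absurd (pvChEq c 'z' (by simpa [show 'z'.toNat = 122 from rfl] using he)) hc
  · omega

theorem pvBoundsOf (u : List Char) (c : Char) (m : Nat)
    (hw : pvLower (u ++ c :: List.replicate m 'z')) (hc : c ≠ 'z') :
    97 ≤ c.toNat ∧ c.toNat ≤ 121 := pvChBounds c (hw c (by simp)) hc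

theorem pvIncAB (w : List Char) (hw : pvLower w) : pvIncA w = pvIncB w := by
  rcases pvDecomp w with ⟨n, rfl⟩ | ⟨u, c, m, rfl, hc⟩
  · rw [pvIncB_allz]
    unfold pvIncA
    rw [List.length_replicate, pvIncA_allz]
  · obtain ⟨h1, h2⟩ := pvBoundsOf u c m hw hc
    rw [pvIncB_gen u c m h1 h2]
    unfold pvIncA
    rw [show (u ++ c :: List.replicate m 'z').length = u.length + 1 + m by simp; omega]
    rw [pvIncA_gen m u c h1 h2]

theorem pvMemSlice (l : List Char) (a b : Option Int) (x : Char)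
    (hx : x ∈ PySem.List.slice l a b) : x ∈ l := by
  unfold PySem.List.slice at hx
  exact List.mem_of_mem_drop (List.mem_of_mem_take hx)

theorem pvLowerPres (w : List Char) (hw : pvLower w) : pvLower (pvIncB w) := by
  rcases pvDecomp w with ⟨n, rfl⟩ | ⟨u, c, m, rfl, hc⟩
  · rw [pvIncB_allz]
    intro x hx
    rw [List.eq_of_mem_replicate (pvMemSlice _ _ _ _ hx)]
    exact ⟨by decide, by decide⟩
  · obtain ⟨h1, h2⟩ := pvBoundsOf u c m hw hc
    rw [pvIncB_gen u c m h1 h2]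
    intro x hx
    have hx' := pvMemSlice _ _ _ _ hx
    rcases List.mem_append.1 hx' with hu | hrest
    · exact hw x (List.mem_append.2 (Or.inl hu))
    · rcases List.mem_cons.1 hrest with rfl | hz
      · constructor
        · rw [pvChLe, show 'a'.toNat = 97 from rfl, pvChToNatOf _ (by omega)]; omega
        · rw [pvChLe, show 'z'.toNat = 122 from rfl, pvChToNatOf _ (by omega)]; omega
      · rw [List.eq_of_mem_replicate hz]
        exact ⟨by decide, by decide⟩

theorem pvSliceNeg8 (l : List Char) :
    PySem.List.slice l (some (-8)) none = l.drop (l.length - 8) := by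
  unfold PySem.List.slice PySem.List.clampIdx
  dsimp only
  rw [if_pos (by norm_num)]
  by_cases h : (l.length : Int) + (-8) < 0
  · rw [if_pos h]
    simp only [List.drop_zero, Nat.sub_zero]
    rw [show l.length - 8 = 0 by omega, List.drop_zero]
    exact List.take_of_length_le (le_refl _)
  · rw [if_neg h]
    have e : ((l.length : Int) + (-8)).toNat = l.length - 8 := by omega
    rw [e]
    exact List.take_of_length_le (by simp)

-- the first loop iteration needs only the scanned suffix of the word to be lowercase
theorem pvPreStep (w : List Char)
    (hlast : ∀ c ∈ w.drop (w.length - 8), 'a' ≤ c ∧ c ≤ 'z')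
    (hz : w.drop (w.length - 8) ≠ List.replicate 8 'z' ∨ pvLower w) :
    pvIncA w = pvIncB w ∧ pvLower (pvIncB w) := by
  rcases pvDecomp w with ⟨n, rfl⟩ | ⟨u, c, m, rfl, hc⟩
  · constructor
    · rw [pvIncB_allz]
      unfold pvIncA
      rw [List.length_replicate, pvIncA_allz]
    · rw [pvIncB_allz]
      intro x hx
      rw [List.eq_of_mem_replicate (pvMemSlice _ _ _ _ hx)]
      exact ⟨by decide, by decide⟩
  · by_cases hw : pvLower (u ++ c :: List.replicate m 'z')
    · exact ⟨pvIncAB _ hw, pvLowerPres _ hw⟩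
    · have hlen : (u ++ c :: List.replicate m 'z').length = u.length + 1 + m := by
        simp; omega
      have hn8 : 8 ≤ u.length + 1 + m := by
        by_contra hsm
        refine hw ?_
        have h0 : (u ++ c :: List.replicate m 'z').length - 8 = 0 := by omega
        rw [h0, List.drop_zero] at hlast
        exact hlast
      rw [hlen] at hlast
      have hdz : (u ++ c :: List.replicate m 'z').drop (u.length + 1 + m - 8) ≠
          List.replicate 8 'z' := by
        rcases hz with h | h
        · rwa [hlen] at h
        · exact absurd h hw
      have hm : m ≤ 7 := by
        by_contra hm8
        apply hdz
        rw [show u ++ c :: List.replicate m 'z' = (u ++ [c]) ++ List.replicate m 'z' by simp]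
        rw [List.drop_append]
        rw [List.drop_of_length_le (by simp; omega), List.drop_replicate]
        rw [List.nil_append]
        congr 1
        simp
        omega
      have hcm : c ∈ (u ++ c :: List.replicate m 'z').drop (u.length + 1 + m - 8) := by
        rw [List.drop_append_of_le_length (by omega)]
        exact List.mem_append.2 (Or.inr (List.mem_cons_self))
      obtain ⟨h1, h2⟩ := pvChBounds c (hlast c hcm) hc
      constructor
      · rw [pvIncB_gen u c m h1 h2]
        unfold pvIncA
        rw [hlen, pvIncA_gen m u c h1 h2]
      · rw [pvIncB_gen u c m h1 h2]
        intro x hx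
        rw [pvSliceNeg8] at hx
        rw [show (u ++ Char.ofNat (c.toNat + 1) :: List.replicate m 'a').length =
            u.length + 1 + m by simp; omega] at hx
        rw [List.drop_append_of_le_length (by omega)] at hx
        rcases List.mem_append.1 hx with hu | hr
        · refine hlast x ?_
          rw [List.drop_append_of_le_length (by omega)]
          exact List.mem_append.2 (Or.inl hu)
        · rcases List.mem_cons.1 hr with rfl | hz2
          · constructor
            · rw [pvChLe, show 'a'.toNat = 97 from rfl, pvChToNatOf _ (by omega)]; omega
            · rw [pvChLe, show 'z'.toNat = 122 from rfl, pvChToNatOf _ (by omega)]; omega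
          · rw [List.eq_of_mem_replicate hz2]
            exact ⟨by decide, by decide⟩

-- ---- one step of the two loops agrees ----

theorem pvStepAB (f : Nat) (w : List Char) :
    pvLoopA (f + 1) w = (if pvValidB w then w else pvLoopA f (pvIncA w)) := by
  rw [pvLoopA, pvValidB_eq]
  by_cases h1 : (PySem.Set.inter (PySem.Set.ofList ['i', 'o', 'l']) (PySem.Set.ofList w) = [])
  · rw [if_neg (not_not_intro h1)]
    rw [(pvIolA_iff w).1 h1]
    by_cases h2 : pvStraightLoopA w 0 = true
    · rw [if_neg (not_not_intro h2), h2]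
      by_cases h3 : PySem.Set.len (PySem.Set.ofList (pvPairsLoopA w)) < 2
      · rw [if_pos h3]
        have hd : decide (2 ≤ PySem.Set.len (PySem.Set.ofList (pvPairsLoopA w))) = false := by
          rw [decide_eq_false_iff_not]; omega
        rw [hd]
        simp
      · rw [if_neg h3]
        have hd : decide (2 ≤ PySem.Set.len (PySem.Set.ofList (pvPairsLoopA w))) = true := by
          rw [decide_eq_true_eq]; omega
        rw [hd]
        simp
    · rw [if_pos h2]
      have h2' : pvStraightLoopA w 0 = false := by
        cases hx : pvStraightLoopA w 0
        · rfl
        · exact absurd hx h2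
      rw [h2']
      simp
  · rw [if_pos h1]
    have hany : (w.any fun c => decide (c ∈ ['i', 'o', 'l'])) = true := by
      cases hx : (w.any fun c => decide (c ∈ ['i', 'o', 'l']))
      · exact absurd ((pvIolA_iff w).2 hx) h1
      · rfl
    rw [hany]
    simp

theorem pvLoopAB : ∀ (f : Nat) (w : List Char), pvLower w → pvLoopA f w = pvLoopB f w := by
  intro f
  induction f with
  | zero => intro w _; rfl
  | succ f ih =>
    intro w hw
    rw [pvStepAB, pvLoopB]
    by_cases hv : pvValidB w = true
    · rw [if_pos hv, if_pos hv]
    · rw [if_neg hv, if_neg hv, pvIncAB w hw, ih _ (pvLowerPres w hw)]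

-- ===== VERDICT (by name: the statement is the Claim_ definition above) =====
theorem get_password_spec : Claim_equal_get_password := by
  intro word _ hpre
  obtain ⟨h5, hall, hz⟩ := hpre
  have hlast : ∀ c ∈ word.toList.drop (word.toList.length - 8), 'a' ≤ c ∧ c ≤ 'z' := by
    intro c hc
    have := List.all_eq_true.1 hall c hc
    simpa [pvLowChar] using this
  have hz' : word.toList.drop (word.toList.length - 8) ≠ List.replicate 8 'z' ∨
      pvLower word.toList := by
    rcases hz with h | h
    · exact Or.inl h
    · refine Or.inr fun c hc => ?_
      have := List.all_eq_true.1 h c hc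
      simpa [pvLowChar] using this
  unfold Spec_get_password get_password get_password_alt
  rw [show pvFuelA = 208827064577 + 1 from rfl, show pvFuelB = 208827064577 + 1 from rfl]
  rw [pvStepAB, pvLoopB]
  by_cases hv : pvValidB word.toList = true
  · rw [if_pos hv, if_pos hv]
  · rw [if_neg hv, if_neg hv]
    obtain ⟨hEq, hLow⟩ := pvPreStep word.toList hlast hz'
    rw [hEq, pvLoopAB _ _ hLow]
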